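-- pv_equiv track=rewrite | github.com/fuseainl/attendee | bots/automatic_leave_utils.py | string_contains_keywords
-- ===== SOURCE A (Python) =====
-- from typing import Iterable
--
-- def string_contains_keywords(string: str, keywords_list: Iterable[str]) -> bool:
--     """
--     Returns True if `string` contains ANY keyword from `keywords_list` as a contiguous
--     sequence of space-delimited words (case-sensitive).
--
--     - Delimiter is a single space (per prompt).
--     - Multi-word keywords must appear in the same order and contiguously.
--       e.g. "Bob Johnson senior" matches "Bob Johnson"
--            "Bob senior Johnson" does NOT match "Bob Johnson"
--     """
--     words = string.split(" ")
--     if not words: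
--         return False
--
--     for kw in keywords_list:
--         kw_words = kw.split(" ")
--         if not kw_words:
--             continue
--
--         k = len(kw_words)
--         if k > len(words):
--             continue
--
--         # Sliding window exact match for contiguous sequence
--         for i in range(len(words) - k + 1):
--             if words[i : i + k] == kw_words:
--                 return True
--
--     return False
-- ===== SOURCE B (Python) =====
-- from typing import Iterable
--
-- def string_contains_keywords(string: str, keywords_list: Iterable[str]) -> bool:
--     # Precompute the string's word n-grams into length-keyed sets (built lazily,
--     # once per distinct keyword length), so each keyword is a single set lookup.
--     words = string.split(" ")
--     grams = {}  # keyword length -> set of word n-grams of that length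
--     for kw in keywords_list:
--         kw_words = tuple(kw.split(" "))
--         k = len(kw_words)
--         if k not in grams:
--             grams[k] = {tuple(words[i : i + k]) for i in range(len(words) - k + 1)}
--         if kw_words in grams[k]:
--             return True
--     return False
-- ===== Notes on version B (the rewrite author's own statement) =====
-- stated objective: faster
-- what changed: Replaces the per-keyword sliding-window list comparison with length-keyed sets of the string's word n-grams, built once per distinct keyword length, so each keyword becomes a single hashed set lookup.
import Mathlib
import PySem

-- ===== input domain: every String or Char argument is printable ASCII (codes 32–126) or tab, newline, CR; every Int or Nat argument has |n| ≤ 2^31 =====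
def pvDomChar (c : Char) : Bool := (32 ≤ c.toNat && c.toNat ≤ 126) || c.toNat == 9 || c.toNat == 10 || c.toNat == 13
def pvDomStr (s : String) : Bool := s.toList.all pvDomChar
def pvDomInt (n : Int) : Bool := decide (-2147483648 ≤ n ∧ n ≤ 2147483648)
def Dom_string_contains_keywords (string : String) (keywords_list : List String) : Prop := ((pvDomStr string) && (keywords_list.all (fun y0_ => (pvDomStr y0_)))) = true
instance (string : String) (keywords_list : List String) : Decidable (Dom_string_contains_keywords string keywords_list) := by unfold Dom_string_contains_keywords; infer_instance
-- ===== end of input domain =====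

-- B replaces A's per-keyword sliding-window scan by length-keyed sets of word n-grams
-- (built once per distinct keyword length), turning each keyword into one set lookup (faster).


-- ===== PORT A =====
-- string.split(" "): the separator is the nonempty literal " ", so split? is always `some`;
-- .getD [] is exact here.
def pvSplitA (s : String) : List String := (PySem.Str.split? s " ").getD []

-- the `for kw in keywords_list` loop with its early `return True`
def pvLoopA (words : List String) : List String → Bool
  | [] => false
  | kw :: rest =>
    let kw_words := pvSplitA kw
    if kw_words.isEmpty then pvLoopA words rest          -- `if not kw_words: continue`
    else
      let k := (kw_words.length : Int)
      if k > (words.length : Int) then pvLoopA words rest  -- `if k > len(words): continue`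
      else if (PySem.List.pyRange 0 ((words.length : Int) - k + 1) 1).any
                (fun i => PySem.List.slice words (some i) (some (i + k)) == kw_words)
        then true
        else pvLoopA words rest

def string_contains_keywords (string : String) (keywords_list : List String) : Bool :=
  let words := pvSplitA string
  if words.isEmpty then false
  else pvLoopA words keywords_list

-- ===== PORT B =====
-- {tuple(words[i:i+k]) for i in range(len(words) - k + 1)}
def pvGrams (words : List String) (k : Int) : PySem.Set (List String) :=
  PySem.Set.ofList ((PySem.List.pyRange 0 ((words.length : Int) - k + 1) 1).map
    (fun i => PySem.List.slice words (some i) (some (i + k))))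

-- the `for kw` loop of B, carrying the lazily-filled dict `grams`
def pvLoopB (words : List String) (grams : PySem.Dict Int (PySem.Set (List String))) :
    List String → Bool
  | [] => false
  | kw :: rest =>
    let kw_words := pvSplitA kw
    let k := (kw_words.length : Int)
    let grams' := if grams.contains k then grams else grams.insert k (pvGrams words k)
    if PySem.Set.contains (grams'.getD k PySem.Set.empty) kw_words then true
    else pvLoopB words grams' rest

def string_contains_keywords_alt (string : String) (keywords_list : List String) : Bool :=
  pvLoopB (pvSplitA string) PySem.Dict.empty keywords_list

-- ===== PRECONDITION & SPEC =====
def Spec_string_contains_keywords (string : String) (keywords_list : List String) (out : Bool) : Prop := out = string_contains_keywords_alt string keywords_list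
instance (string : String) (keywords_list : List String) (out : Bool) : Decidable (Spec_string_contains_keywords string keywords_list out) := by unfold Spec_string_contains_keywords; infer_instance

-- ===== CLAIM (what is proved, stated in full; the proofs are below) =====
def Claim_equal_string_contains_keywords : Prop := ∀ (string : String) (keywords_list : List String), Dom_string_contains_keywords string keywords_list → Spec_string_contains_keywords string keywords_list (string_contains_keywords string keywords_list)

-- ===== LEMMAS AND PROOFS =====

-- split(" ") never yields the empty list
theorem pvGo_ne_nil (sep : List Char) :
    ∀ fuel l cur acc, PySem.Chars.splitOn.go sep fuel l cur acc ≠ [] := by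
  intro fuel
  induction fuel with
  | zero => intro l cur acc; simp [PySem.Chars.splitOn.go]
  | succ n ih =>
    intro l cur acc
    cases l with
    | nil => simp [PySem.Chars.splitOn.go]
    | cons c rest =>
      simp only [PySem.Chars.splitOn.go]
      split
      · exact ih _ _ _
      · exact ih _ _ _

theorem pvSplitA_ne_nil (s : String) : pvSplitA s ≠ [] := by
  simp [pvSplitA, PySem.Str.split?, PySem.Chars.split?, PySem.Chars.splitOn]
  exact pvGo_ne_nil _ _ _ _ _

-- the stored set for any present key is the n-gram set of that key
def pvInv (words : List String) (grams : PySem.Dict Int (PySem.Set (List String))) : Prop :=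
  ∀ k s, grams.get? k = some s → s = pvGrams words k

-- set-membership lookup = the sliding-window `any`
theorem pvContains_grams (words : List String) (k : Int) (x : List String) :
    PySem.Set.contains (pvGrams words k) x
      = (PySem.List.pyRange 0 ((words.length : Int) - k + 1) 1).any
          (fun i => PySem.List.slice words (some i) (some (i + k)) == x) := by
  rw [Bool.eq_iff_iff]
  simp only [pvGrams, PySem.Set.contains_iff, PySem.Set.mem_ofList, List.any_eq_true,
    List.mem_map, beq_iff_eq]

theorem pvLoop_eq (words : List String) :
    ∀ (kws : List String) (grams : PySem.Dict Int (PySem.Set (List String))),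
      pvInv words grams → pvLoopB words grams kws = pvLoopA words kws := by
  intro kws
  induction kws with
  | nil => intro grams _; rfl
  | cons kw rest ih =>
    intro grams hInv
    have hne : (pvSplitA kw).isEmpty = false := by
      simpa [List.isEmpty_iff] using pvSplitA_ne_nil kw
    simp only [pvLoopB, pvLoopA, hne, Bool.false_eq_true, if_false]
    set k : Int := ((pvSplitA kw).length : Int) with hk
    set grams' := if grams.contains k then grams else grams.insert k (pvGrams words k) with hg'
    have hInv' : pvInv words grams' := by
      rw [hg']; split
      · exact hInv
      · intro k' s hs
        by_cases h : k' = k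
        · subst h; rw [PySem.Dict.get?_insert_self] at hs; exact (Option.some_inj.mp hs).symm
        · rw [PySem.Dict.get?_insert_of_ne _ _ h] at hs; exact hInv _ _ hs
    have hget : grams'.getD k PySem.Set.empty = pvGrams words k := by
      rw [hg']; split
      · next hc =>
        rw [PySem.Dict.contains_eq_isSome_get?] at hc
        obtain ⟨s, hs⟩ := Option.isSome_iff_exists.mp hc
        rw [PySem.Dict.getD_eq_get?_getD, hs, Option.getD_some]
        exact hInv _ _ hs
      · rw [PySem.Dict.getD_insert]; simp
    rw [hget, pvContains_grams]
    by_cases hbig : k > (words.length : Int)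
    · have hnil : PySem.List.pyRange 0 ((words.length : Int) - k + 1) 1 = [] :=
        PySem.List.pyRange_one_eq_nil (by omega)
      rw [hnil, if_pos hbig]
      simp only [List.any_nil, Bool.false_eq_true, if_false]
      exact ih grams' hInv'
    · rw [if_neg hbig]
      split
      · rfl
      · exact ih grams' hInv'

theorem string_contains_keywords_spec : Claim_equal_string_contains_keywords := by
  intro string keywords_list _
  show string_contains_keywords string keywords_list = string_contains_keywords_alt string keywords_list
  unfold string_contains_keywords string_contains_keywords_alt
  have hne : (pvSplitA string).isEmpty = false := by
    simpa [List.isEmpty_iff] using pvSplitA_ne_nil string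
  simp only [hne, Bool.false_eq_true, if_false]
  exact (pvLoop_eq _ _ _ (fun k s h => by simp [PySem.Dict.get?_empty] at h)).symm
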